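-- pv_equiv track=rewrite | github.com/josephambe/python_kgame | kgame.py | remove_whiteSpaces
-- ===== SOURCE A (Python) =====
-- KGAME_SIDES = 4
--
-- dirs = {'UP': 1, 'DOWN': 2, 'LEFT': 3, 'RIGHT': 4}
--
-- def remove_whiteSpaces(game, row, direction):
--
--     # Find free cell closest to the side in that direction
--     if direction == dirs['LEFT']:
--         currentLeftFree = 0
--         for col in range(0, KGAME_SIDES):
--             if game['board'][row][col] != ' ':
--                 currentLeftFree += 1
--             else:
--                 break
--
--         for col in range(currentLeftFree + 1, KGAME_SIDES):
--
--                 if game['board'][row][col] != ' ' and game['board'][row][currentLeftFree] == ' ':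
--                     game['board'][row][currentLeftFree] = game['board'][row][col]
--                     game['board'][row][col] = ' '
--                     currentLeftFree += 1
--
--     elif direction == dirs['RIGHT']:
--         currentRightFree = KGAME_SIDES-1
--         for col in range(KGAME_SIDES-1, -1, -1):
--             if game['board'][row][col] != ' ':
--                 currentRightFree -= 1
--             else:
--                 break
--
--         for col in range(currentRightFree, -1, -1):
--
--             if game['board'][row][col] != ' ' and game['board'][row][currentRightFree] == ' ':
--                 game['board'][row][currentRightFree] = game['board'][row][col]
--                 game['board'][row][col] = ' '
--                 currentRightFree -= 1
--
--     elif direction == dirs['UP']: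
--
--         currentRowFree = 0
--         for col in range(0, KGAME_SIDES):
--             if game['board'][col][row] != ' ':
--                 currentRowFree += 1
--             else:
--                 break
--
--         for col in range(currentRowFree + 1, KGAME_SIDES):
--
--             if game['board'][col][row] != ' ' and game['board'][currentRowFree][row] == ' ':
--                 game['board'][currentRowFree][row] = game['board'][col][row]
--                 game['board'][col][row] = ' '
--                 currentRowFree += 1
--
--     elif direction == dirs['DOWN']:
--
--         currentDownFree = KGAME_SIDES-1
--         for col in range(KGAME_SIDES-1, -1, -1):
--             if game['board'][col][row] != ' ':
--                 currentDownFree -= 1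
--             else:
--                 break
--
--         for col in range(currentDownFree, -1, -1):
--
--             if game['board'][col][row] != ' ' and game['board'][currentDownFree][row] == ' ':
--                 game['board'][currentDownFree][row] = game['board'][col][row]
--                 game['board'][col][row] = ' '
--                 currentDownFree -= 1
--
--     return game
-- ===== SOURCE B (Python) =====
-- KGAME_SIDES = 4
--
-- dirs = {'UP': 1, 'DOWN': 2, 'LEFT': 3, 'RIGHT': 4}
--
-- def remove_whiteSpaces(game, row, direction):
--     # Pack the non-space tiles of the selected line against the chosen edge,
--     # rewriting the four cells in place instead of sliding them one by one.
--     if direction == dirs['LEFT'] or direction == dirs['RIGHT']: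
--         line = [game['board'][row][c] for c in range(KGAME_SIDES)]
--         tiles = [t for t in line if t != ' ']
--         pad = [' '] * (KGAME_SIDES - len(tiles))
--         new = tiles + pad if direction == dirs['LEFT'] else pad + tiles
--         for c in range(KGAME_SIDES):
--             game['board'][row][c] = new[c]
--     elif direction == dirs['UP'] or direction == dirs['DOWN']:
--         line = [game['board'][c][row] for c in range(KGAME_SIDES)]
--         tiles = [t for t in line if t != ' ']
--         pad = [' '] * (KGAME_SIDES - len(tiles))
--         new = tiles + pad if direction == dirs['UP'] else pad + tiles
--         for c in range(KGAME_SIDES):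
--             game['board'][c][row] = new[c]
--     return game
-- ===== Notes on version B (the rewrite author's own statement) =====
-- stated objective: simpler
-- what changed: A slides each tile stepwise with a scan-for-first-free loop plus a move loop per direction; B collects the non-space tiles of the selected row/column once and rewrites the four cells as tiles packed against the chosen edge padded with spaces. Both mutate the board in place; equivalence is about the returned game (which aliases it).
import Mathlib
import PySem

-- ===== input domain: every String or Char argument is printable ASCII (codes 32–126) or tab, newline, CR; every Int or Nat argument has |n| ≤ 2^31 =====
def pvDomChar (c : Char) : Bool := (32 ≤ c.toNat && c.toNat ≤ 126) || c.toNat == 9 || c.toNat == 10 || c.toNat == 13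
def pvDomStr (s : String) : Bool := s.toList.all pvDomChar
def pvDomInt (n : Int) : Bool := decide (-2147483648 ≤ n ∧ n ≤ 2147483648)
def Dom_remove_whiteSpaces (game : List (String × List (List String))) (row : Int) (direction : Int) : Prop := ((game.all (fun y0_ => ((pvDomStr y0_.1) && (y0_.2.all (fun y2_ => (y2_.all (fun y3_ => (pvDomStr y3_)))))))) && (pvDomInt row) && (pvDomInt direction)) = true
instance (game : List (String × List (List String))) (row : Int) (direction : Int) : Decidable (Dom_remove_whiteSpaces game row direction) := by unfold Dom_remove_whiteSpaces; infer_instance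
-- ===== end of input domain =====

-- A mutates the inner board lists in place and returns the same game object; both ports model
-- the RETURN value only (the Python B performs the same in-place mutation).
-- B: collect the non-space tiles of the line once and rewrite the four cells packed against the
-- chosen edge, instead of A's scan-for-first-free plus stepwise slide loops (objective: simpler).

-- ===== PORT A =====
-- first loop of each branch: advance free past leading non-space cells, break at first space
def pvFFL (cells : List String) (cols : List Nat) (free : Nat) : Nat :=
  match cols with
  | [] => free
  | c :: rest => if cells.getD c "" ≠ " " then pvFFL cells rest (free + 1) else free

def pvFFR (cells : List String) (cols : List Nat) (free : Int) : Int :=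
  match cols with
  | [] => free
  | c :: rest => if cells.getD c "" ≠ " " then pvFFR cells rest (free - 1) else free

-- second loop: move cell col to the current free cell when possible
def pvSlideL (cells : List String) (free : Nat) (cols : List Nat) : List String :=
  match cols with
  | [] => cells
  | c :: rest =>
    if cells.getD c "" ≠ " " ∧ cells.getD free "" = " " then
      pvSlideL ((cells.set free (cells.getD c "")).set c " ") (free + 1) rest
    else pvSlideL cells free rest

def pvSlideR (cells : List String) (free : Int) (cols : List Int) : List String :=
  match cols with
  | [] => cells
  | c :: rest =>
    if cells.getD c.toNat "" ≠ " " ∧ cells.getD free.toNat "" = " " then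
      pvSlideR ((cells.set free.toNat (cells.getD c.toNat "")).set c.toNat " ") (free - 1) rest
    else pvSlideR cells free rest

-- the whole LEFT (resp. RIGHT) body on the 4 cells of the line; exact because A only reads and
-- writes positions 0..3 of that line
def pvLineL (cells : List String) : List String :=
  let f := pvFFL cells [0, 1, 2, 3] 0
  pvSlideL cells f ((List.range (4 - (f + 1))).map (fun k => f + 1 + k))

def pvLineR (cells : List String) : List String :=
  let f := pvFFR cells [3, 2, 1, 0] 3
  pvSlideR cells f ((List.range ((f + 1).toNat)).reverse.map (fun k => (k : Int)))

def remove_whiteSpaces (game : List (String × List (List String))) (row : Int) (direction : Int) : List (String × List (List String)) :=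
  if direction = 3 then  -- LEFT
    match (PySem.Dict.mk game).get? "board" with
    | none => game       -- KeyError, excluded by Pre_
    | some board =>
      match PySem.List.pyGet? board row with
      | none => game     -- IndexError, excluded by Pre_
      | some r =>
        let cells := pvLineL [r.getD 0 "", r.getD 1 "", r.getD 2 "", r.getD 3 ""]
        let r' := (((r.set 0 (cells.getD 0 " ")).set 1 (cells.getD 1 " ")).set 2 (cells.getD 2 " ")).set 3 (cells.getD 3 " ")
        ((PySem.Dict.mk game).insert "board" (PySem.List.pySetD board row r')).items
  else if direction = 4 then  -- RIGHT
    match (PySem.Dict.mk game).get? "board" with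
    | none => game
    | some board =>
      match PySem.List.pyGet? board row with
      | none => game
      | some r =>
        let cells := pvLineR [r.getD 0 "", r.getD 1 "", r.getD 2 "", r.getD 3 ""]
        let r' := (((r.set 0 (cells.getD 0 " ")).set 1 (cells.getD 1 " ")).set 2 (cells.getD 2 " ")).set 3 (cells.getD 3 " ")
        ((PySem.Dict.mk game).insert "board" (PySem.List.pySetD board row r')).items
  else if direction = 1 then  -- UP: same slide along the column board[c][row], c = 0..3
    match (PySem.Dict.mk game).get? "board" with
    | none => game
    | some board =>
      let cells := pvLineL [PySem.List.pyGetD (board.getD 0 []) row "", PySem.List.pyGetD (board.getD 1 []) row "",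
                            PySem.List.pyGetD (board.getD 2 []) row "", PySem.List.pyGetD (board.getD 3 []) row ""]
      let b0 := board.set 0 (PySem.List.pySetD (board.getD 0 []) row (cells.getD 0 " "))
      let b1 := b0.set 1 (PySem.List.pySetD (b0.getD 1 []) row (cells.getD 1 " "))
      let b2 := b1.set 2 (PySem.List.pySetD (b1.getD 2 []) row (cells.getD 2 " "))
      let b3 := b2.set 3 (PySem.List.pySetD (b2.getD 3 []) row (cells.getD 3 " "))
      ((PySem.Dict.mk game).insert "board" b3).items
  else if direction = 2 then  -- DOWN
    match (PySem.Dict.mk game).get? "board" with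
    | none => game
    | some board =>
      let cells := pvLineR [PySem.List.pyGetD (board.getD 0 []) row "", PySem.List.pyGetD (board.getD 1 []) row "",
                            PySem.List.pyGetD (board.getD 2 []) row "", PySem.List.pyGetD (board.getD 3 []) row ""]
      let b0 := board.set 0 (PySem.List.pySetD (board.getD 0 []) row (cells.getD 0 " "))
      let b1 := b0.set 1 (PySem.List.pySetD (b0.getD 1 []) row (cells.getD 1 " "))
      let b2 := b1.set 2 (PySem.List.pySetD (b1.getD 2 []) row (cells.getD 2 " "))
      let b3 := b2.set 3 (PySem.List.pySetD (b2.getD 3 []) row (cells.getD 3 " "))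
      ((PySem.Dict.mk game).insert "board" b3).items
  else game

-- ===== PORT B =====
def remove_whiteSpaces_alt (game : List (String × List (List String))) (row : Int) (direction : Int) : List (String × List (List String)) :=
  if direction = 3 ∨ direction = 4 then
    match (PySem.Dict.mk game).get? "board" with
    | none => game       -- KeyError, excluded by Pre_
    | some board =>
      match PySem.List.pyGet? board row with
      | none => game     -- IndexError, excluded by Pre_
      | some r =>
        let line := (List.range 4).map (fun c => r.getD c "")
        let tiles := line.filter (fun t => t ≠ " ")
        let new := if direction = 3 then tiles ++ List.replicate (4 - tiles.length) " "
                   else List.replicate (4 - tiles.length) " " ++ tiles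
        let r' := (List.range 4).foldl (fun rr c => rr.set c (new.getD c " ")) r
        ((PySem.Dict.mk game).insert "board" (PySem.List.pySetD board row r')).items
  else if direction = 1 ∨ direction = 2 then
    match (PySem.Dict.mk game).get? "board" with
    | none => game
    | some board =>
      let line := (List.range 4).map (fun c => PySem.List.pyGetD (board.getD c []) row "")
      let tiles := line.filter (fun t => t ≠ " ")
      let new := if direction = 1 then tiles ++ List.replicate (4 - tiles.length) " "
                 else List.replicate (4 - tiles.length) " " ++ tiles
      let board' := (List.range 4).foldl
        (fun bd c => bd.set c (PySem.List.pySetD (bd.getD c []) row (new.getD c " "))) board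
      ((PySem.Dict.mk game).insert "board" board').items
  else game

-- ===== PRECONDITION & SPEC =====
-- Pre_: exactly the inputs where the Python raises no exception — for LEFT/RIGHT 'board' must
-- exist, row must be a valid (possibly negative) index into it and that row must have ≥ 4 cells;
-- for UP/DOWN 'board' must have ≥ 4 rows and row must be a valid index into each of the first 4.
def Pre_remove_whiteSpaces (game : List (String × List (List String))) (row : Int) (direction : Int) : Prop :=
  (direction = 3 ∨ direction = 4 →
    ((PySem.Dict.mk game).get? "board").isSome = true ∧
    PySem.Raise.InRange (((PySem.Dict.mk game).get? "board").getD []).length row ∧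
    4 ≤ ((PySem.List.pyGet? (((PySem.Dict.mk game).get? "board").getD []) row).getD []).length) ∧
  (direction = 1 ∨ direction = 2 →
    ((PySem.Dict.mk game).get? "board").isSome = true ∧
    4 ≤ (((PySem.Dict.mk game).get? "board").getD []).length ∧
    ∀ c ∈ List.range 4, PySem.Raise.InRange ((((PySem.Dict.mk game).get? "board").getD []).getD c []).length row)

instance (game : List (String × List (List String))) (row : Int) (direction : Int) : Decidable (Pre_remove_whiteSpaces game row direction) := by unfold Pre_remove_whiteSpaces; infer_instance

def pvWitness_remove_whiteSpaces : (List (String × List (List String))) × Int × Int :=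
  ([("board", [["2", " ", "2", " "], ["4", "4", " ", " "], [" ", " ", " ", " "], ["2", " ", " ", "8"]])], 0, 3)

def Spec_remove_whiteSpaces (game : List (String × List (List String))) (row : Int) (direction : Int) (out : List (String × List (List String))) : Prop := out = remove_whiteSpaces_alt game row direction
instance (game : List (String × List (List String))) (row : Int) (direction : Int) (out : List (String × List (List String))) : Decidable (Spec_remove_whiteSpaces game row direction out) := by unfold Spec_remove_whiteSpaces; infer_instance

-- ===== CLAIM (what is proved, stated in full; the proofs are below) =====
def Claim_equal_remove_whiteSpaces : Prop := ∀ (game : List (String × List (List String))) (row : Int) (direction : Int), Dom_remove_whiteSpaces game row direction → Pre_remove_whiteSpaces game row direction → Spec_remove_whiteSpaces game row direction (remove_whiteSpaces game row direction)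

-- ===== LEMMAS AND PROOFS =====
lemma pvRange4 : List.range 4 = [0, 1, 2, 3] := rfl

-- A's LEFT/UP slide on a 4-cell line equals "tiles packed at the start, spaces after"
lemma pvPackL (a b c d : String) :
    pvLineL [a, b, c, d] =
      [a, b, c, d].filter (fun t => t ≠ " ") ++
        List.replicate (4 - ([a, b, c, d].filter (fun t => t ≠ " ")).length) " " := by
  by_cases ha : a = " " <;> by_cases hb : b = " " <;> by_cases hc : c = " " <;> by_cases hd : d = " " <;>
    simp [pvLineL, pvFFL, pvSlideL, List.range_succ, ha, hb, hc, hd, List.getD]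

-- A's RIGHT/DOWN slide on a 4-cell line equals "spaces first, tiles packed at the end"
lemma pvPackR (a b c d : String) :
    pvLineR [a, b, c, d] =
      List.replicate (4 - ([a, b, c, d].filter (fun t => t ≠ " ")).length) " " ++
        [a, b, c, d].filter (fun t => t ≠ " ") := by
  by_cases ha : a = " " <;> by_cases hb : b = " " <;> by_cases hc : c = " " <;> by_cases hd : d = " " <;>
    simp [pvLineR, pvFFR, pvSlideR, List.range_succ, ha, hb, hc, hd, List.getD]

-- ===== VERDICT (by name: the statement is the Claim_ definition above) =====
theorem remove_whiteSpaces_spec : Claim_equal_remove_whiteSpaces := by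
  intro game row direction _dom _pre
  unfold Spec_remove_whiteSpaces remove_whiteSpaces remove_whiteSpaces_alt
  by_cases h3 : direction = 3
  · subst h3
    cases hB : (PySem.Dict.mk game).get? "board" with
    | none => simp
    | some board =>
      cases hR : PySem.List.pyGet? board row with
      | none => simp [hR]
      | some r => simp [hR, pvRange4, pvPackL]
  · by_cases h4 : direction = 4
    · subst h4
      cases hB : (PySem.Dict.mk game).get? "board" with
      | none => simp
      | some board =>
        cases hR : PySem.List.pyGet? board row with
        | none => simp [hR]
        | some r => simp [hR, pvRange4, pvPackR]
    · by_cases h1 : direction = 1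
      · subst h1
        cases hB : (PySem.Dict.mk game).get? "board" with
        | none => simp
        | some board => simp [pvRange4, pvPackL]
      · by_cases h2 : direction = 2
        · subst h2
          cases hB : (PySem.Dict.mk game).get? "board" with
          | none => simp
          | some board => simp [pvRange4, pvPackR]
        · simp [h1, h2, h3, h4]
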